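-- pv_equiv track=rewrite | github.com/npak243/AdvanceOfCode | 2023/day_1_2.py | parse_first_last_digit
-- ===== SOURCE A (Python) =====
-- def parse_first_last_digit(input_str: str):
--     """Parse the first/last digit"""
--     check_list = ["one", "two", "three", "four", "five", "six", "seven", "eight", "nine", "1", "2", "3", "4", "5", "6", "7", "8", "9"]
--     convert_str_int = {
--         "one": 1,
--         "two": 2,
--         "three": 3,
--         "four": 4,
--         "five": 5,
--         "six": 6,
--         "seven": 7,
--         "eight": 8,
--         "nine": 9,
--         "1": 1,
--         "2": 2,
--         "3": 3,
--         "4": 4,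
--         "5": 5,
--         "6": 6,
--         "7": 7,
--         "8": 8,
--         "9": 9
--     }
--     first_digit = None
--     pos_1 = 100
--     last_digit = None
--     pos_2 = -100
--     for digit in check_list:
--         cur_pos = input_str.find(digit)
--         if cur_pos >= 0 and cur_pos < pos_1:
--             pos_1 = cur_pos
--             first_digit = convert_str_int[digit]
--
--         cur_pos = input_str.rfind(digit)
--         if cur_pos >= 0 and cur_pos > pos_2:
--             pos_2 = cur_pos
--             last_digit = convert_str_int[digit]
--
--     return first_digit*10 + last_digit
-- ===== SOURCE B (Python) =====
-- def parse_first_last_digit(input_str: str):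
--     """Parse the first/last digit"""
--     tokens = [("one", 1), ("two", 2), ("three", 3), ("four", 4), ("five", 5),
--               ("six", 6), ("seven", 7), ("eight", 8), ("nine", 9),
--               ("1", 1), ("2", 2), ("3", 3), ("4", 4), ("5", 5),
--               ("6", 6), ("7", 7), ("8", 8), ("9", 9)]
--     first_digit = None
--     last_digit = None
--     for i in range(len(input_str)):
--         for tok, val in tokens:
--             if input_str.startswith(tok, i):
--                 if first_digit is None:
--                     first_digit = val
--                 last_digit = val
--                 break
--     return first_digit * 10 + last_digit
-- ===== Notes on version B (the rewrite author's own statement) =====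
-- stated objective: faster
-- what changed: Replaces A's 18 find + 18 rfind full-string scans (plus a min/max position tournament) with one left-to-right position scan that tests startswith(token, i) at each index, setting first_digit on the first match and overwriting last_digit on every match.
import Mathlib
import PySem

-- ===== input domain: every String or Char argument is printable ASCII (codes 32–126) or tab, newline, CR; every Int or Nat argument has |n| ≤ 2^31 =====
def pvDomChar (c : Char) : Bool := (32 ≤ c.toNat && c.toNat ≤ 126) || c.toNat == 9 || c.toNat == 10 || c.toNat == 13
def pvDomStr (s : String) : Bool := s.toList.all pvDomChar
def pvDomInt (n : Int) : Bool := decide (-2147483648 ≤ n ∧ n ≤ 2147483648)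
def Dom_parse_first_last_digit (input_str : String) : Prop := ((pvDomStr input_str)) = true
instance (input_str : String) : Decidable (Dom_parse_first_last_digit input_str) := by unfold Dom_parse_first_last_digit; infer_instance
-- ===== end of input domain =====

-- B replaces A's 18 find + 18 rfind whole-string scans with ONE left-to-right position scan
-- (startswith at each index), objective: faster (constant factor; and no 18 separate rescans).
-- Return-value equivalence only; neither version mutates its argument.

-- ===== PORT A =====
-- A's two literal tables
def pvCheckList : List String :=
  ["one","two","three","four","five","six","seven","eight","nine",
   "1","2","3","4","5","6","7","8","9"]
def pvConvert : PySem.Dict String Int :=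
  PySem.Dict.ofList
    [("one",1),("two",2),("three",3),("four",4),("five",5),("six",6),("seven",7),
     ("eight",8),("nine",9),("1",1),("2",2),("3",3),("4",4),("5",5),("6",6),("7",7),("8",8),("9",9)]

-- A's loop body, step for step.  `(pvConvert.getD digit 0)`: Python's convert_str_int[digit];
-- the key is always present (check_list ⊆ dict keys), so the 0 default is never taken.
def pvStepA (input_str : String) (acc : (Option Int × Int) × (Option Int × Int)) (digit : String) :
    (Option Int × Int) × (Option Int × Int) :=
  let (fp, lp) := acc
  let (first_digit, pos_1) := fp
  let (last_digit, pos_2) := lp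
  let cur_pos := PySem.Str.find input_str digit
  let (first_digit, pos_1) :=
    if 0 ≤ cur_pos ∧ cur_pos < pos_1 then (some (pvConvert.getD digit 0), cur_pos)
    else (first_digit, pos_1)
  let cur_pos := PySem.Str.rfind input_str digit
  let (last_digit, pos_2) :=
    if 0 ≤ cur_pos ∧ cur_pos > pos_2 then (some (pvConvert.getD digit 0), cur_pos)
    else (last_digit, pos_2)
  ((first_digit, pos_1), (last_digit, pos_2))

def parse_first_last_digit (input_str : String) : Int :=
  let st := pvCheckList.foldl (pvStepA input_str) ((none, 100), (none, -100))
  match st.1.1, st.2.1 with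
  | some a, some b => a * 10 + b
  | _, _ => 0   -- Python raises TypeError here (None * 10); excluded by Pre_

-- ===== PORT B =====
def pvToks : List (String × Int) :=
  [("one",1),("two",2),("three",3),("four",4),("five",5),("six",6),("seven",7),
   ("eight",8),("nine",9),("1",1),("2",2),("3",3),("4",4),("5",5),("6",6),("7",7),("8",8),("9",9)]

-- B's loop body: first matching token at position i (the inner for/break), then update first/last
def pvStepB (s : List Char) (acc : Option Int × Option Int) (i : Nat) : Option Int × Option Int :=
  match pvToks.find? (fun tv => PySem.Chars.startswith (s.drop i) tv.1.toList) with
  | some tv => ((if acc.1 = none then some tv.2 else acc.1), some tv.2)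
  | none => acc

def parse_first_last_digit_alt (input_str : String) : Int :=
  let s := input_str.toList
  let st := (List.range s.length).foldl (pvStepB s) (none, none)
  match st.1 with
  | none => 0   -- Python raises TypeError here (None * 10); excluded by Pre_
  | some a =>
    match st.2 with
    | none => 0   -- likewise unreachable under Pre_
    | some b => a * 10 + b

-- ===== PRECONDITION & SPEC =====
-- Pre_: some digit token occurs, and the first occurrence is at index < 100 (A's pos_1 = 100
-- sentinel: if the first token occurrence sits at index ≥ 100, or no token occurs at all,
-- A's first_digit stays None and A raises TypeError — exactly those inputs are excluded).
def Pre_parse_first_last_digit (input_str : String) : Prop :=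
  ∃ t ∈ ["one","two","three","four","five","six","seven","eight","nine",
         "1","2","3","4","5","6","7","8","9"],
    0 ≤ PySem.Str.find input_str t ∧ PySem.Str.find input_str t < 100
instance (input_str : String) : Decidable (Pre_parse_first_last_digit input_str) := by
  unfold Pre_parse_first_last_digit; infer_instance

def pvWitness_parse_first_last_digit : String := "zoneight234"

def Spec_parse_first_last_digit (input_str : String) (out : Int) : Prop :=
  out = parse_first_last_digit_alt input_str
instance (input_str : String) (out : Int) : Decidable (Spec_parse_first_last_digit input_str out) := by
  unfold Spec_parse_first_last_digit; infer_instance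

-- ===== CLAIM (what is proved, stated in full; the proofs are below) =====
def Claim_equal_parse_first_last_digit : Prop :=
  ∀ (input_str : String), Dom_parse_first_last_digit input_str →
    Pre_parse_first_last_digit input_str →
    Spec_parse_first_last_digit input_str (parse_first_last_digit input_str)

-- ===== LEMMAS AND PROOFS =====

-- the token (if any) matching at position i, by B's inner scan
def pvMatchAt (s : List Char) (i : Nat) : Option Int :=
  (pvToks.find? (fun tv => PySem.Chars.startswith (s.drop i) tv.1.toList)).map (·.2)

lemma pv_nonempty : ∀ tv ∈ pvToks, tv.1.toList ≠ [] := by decide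

lemma pv_uniq : ∀ tv ∈ pvToks, ∀ uv ∈ pvToks, tv.1.toList <+: uv.1.toList → tv = uv := by decide

lemma pv_check_eq : pvCheckList = pvToks.map (·.1) := by decide

lemma pv_lookup : ∀ tv ∈ pvToks, pvConvert.getD tv.1 0 = tv.2 := by decide

lemma pvStepB_matchAt (s : List Char) (acc : Option Int × Option Int) (i : Nat) :
    pvStepB s acc i =
      match pvMatchAt s i with
      | some v => ((if acc.1 = none then some v else acc.1), some v)
      | none => acc := by
  unfold pvStepB pvMatchAt
  cases h : pvToks.find? (fun tv => PySem.Chars.startswith (s.drop i) tv.1.toList) <;> simp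

lemma pvMatchAt_of_mem {s : List Char} {i : Nat} {tv : String × Int} (h : tv ∈ pvToks)
    (hp : tv.1.toList <+: s.drop i) : pvMatchAt s i = some tv.2 := by
  have hs : (pvToks.find? (fun tv => PySem.Chars.startswith (s.drop i) tv.1.toList)).isSome := by
    exact List.find?_isSome.mpr ⟨tv, h, (PySem.Chars.startswith_iff _ _).mpr hp⟩
  obtain ⟨uv, hf⟩ := Option.isSome_iff_exists.mp hs
  have huv : uv ∈ pvToks := List.mem_of_find?_eq_some hf
  have hfs := List.find?_some (p := fun tv : String × Int => PySem.Chars.startswith (s.drop i) tv.1.toList) hf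
  have hpu : uv.1.toList <+: s.drop i := (PySem.Chars.startswith_iff _ _).mp hfs
  have : uv = tv := by
    rcases List.prefix_or_prefix_of_prefix hpu hp with h1 | h1
    · exact pv_uniq uv huv tv h h1
    · exact (pv_uniq tv h uv huv h1).symm
  unfold pvMatchAt
  simp [hf, this]

lemma pvMatchAt_elim {s : List Char} {i : Nat} {v : Int} (h : pvMatchAt s i = some v) :
    ∃ tv ∈ pvToks, tv.1.toList <+: s.drop i ∧ tv.2 = v := by
  unfold pvMatchAt at h
  obtain ⟨uv, hf, hv⟩ := Option.map_eq_some_iff.mp h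
  have hfs := List.find?_some (p := fun tv : String × Int => PySem.Chars.startswith (s.drop i) tv.1.toList) hf
  exact ⟨uv, List.mem_of_find?_eq_some hf,
    (PySem.Chars.startswith_iff _ _).mp hfs, hv⟩

-- rfind: the HIGHEST occurrence index ≤ fuel, else -1
lemma pv_rfind_go_spec (s t : List Char) : ∀ n : Nat,
    (PySem.Chars.rfind.go s t n = -1 ∧ ∀ i ≤ n, ¬ t <+: s.drop i) ∨
    (∃ k : Nat, PySem.Chars.rfind.go s t n = (k : Int) ∧ k ≤ n ∧ t <+: s.drop k ∧
      ∀ i, k < i → i ≤ n → ¬ t <+: s.drop i) := by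
  intro n
  induction n with
  | zero =>
    by_cases h : t <+: s.drop 0
    · right
      refine ⟨0, ?_, le_refl _, h, by omega⟩
      simp only [PySem.Chars.rfind.go]
      rw [if_pos (List.isPrefixOf_iff_prefix.mpr (by simpa using h))]
      simp
    · left
      refine ⟨?_, ?_⟩
      · simp only [PySem.Chars.rfind.go]
        rw [if_neg]
        intro hc
        exact h (by simpa using List.isPrefixOf_iff_prefix.mp hc)
      · intro i hi
        have : i = 0 := by omega
        subst this; exact h
  | succ j ih =>
    by_cases h : t <+: s.drop (j + 1)
    · right
      refine ⟨j + 1, ?_, le_refl _, h, by omega⟩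
      simp only [PySem.Chars.rfind.go]
      rw [if_pos (List.isPrefixOf_iff_prefix.mpr h)]
    · have hgo : PySem.Chars.rfind.go s t (j + 1) = PySem.Chars.rfind.go s t j := by
        simp only [PySem.Chars.rfind.go]
        rw [if_neg]
        intro hc
        exact h (List.isPrefixOf_iff_prefix.mp hc)
      rcases ih with ⟨h1, h2⟩ | ⟨k, h1, h2, h3, h4⟩
      · left
        refine ⟨by rw [hgo]; exact h1, ?_⟩
        intro i hi
        rcases Nat.lt_or_ge i (j+1) with hlt | hge
        · exact h2 i (by omega)
        · have : i = j + 1 := by omega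
          subst this; exact h
      · right
        refine ⟨k, by rw [hgo]; exact h1, by omega, h3, ?_⟩
        intro i hik hin
        rcases Nat.lt_or_ge i (j+1) with hlt | hge
        · exact h4 i hik (by omega)
        · have : i = j + 1 := by omega
          subst this; exact h

-- fold splits into the independent (first, pos_1) and (last, pos_2) halves
def pvGP (input_str : String) (st : Option Int × Int) (tv : String × Int) : Option Int × Int :=
  let cur := PySem.Str.find input_str tv.1
  if 0 ≤ cur ∧ cur < st.2 then (some tv.2, cur) else st

def pvHP (input_str : String) (st : Option Int × Int) (tv : String × Int) : Option Int × Int :=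
  let cur := PySem.Str.rfind input_str tv.1
  if 0 ≤ cur ∧ cur > st.2 then (some tv.2, cur) else st

lemma pv_foldl_prod {α σ τ : Type} (g : σ → α → σ) (h : τ → α → τ) :
    ∀ (l : List α) (a : σ) (b : τ),
      l.foldl (fun p x => (g p.1 x, h p.2 x)) (a, b) = (l.foldl g a, l.foldl h b) := by
  intro l
  induction l with
  | nil => intro a b; rfl
  | cons x xs ih => intro a b; simpa using ih (g a x) (h b x)

lemma pvA_fold_eq (input_str : String) :
    pvCheckList.foldl (pvStepA input_str) ((none, 100), (none, -100)) =
      (pvToks.foldl (pvGP input_str) (none, 100), pvToks.foldl (pvHP input_str) (none, -100)) := by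
  rw [pv_check_eq, List.foldl_map]
  rw [PySem.List.foldl_congr_mem _ _
    (fun (p : (Option Int × Int) × (Option Int × Int)) tv => (pvGP input_str p.1 tv, pvHP input_str p.2 tv)) _
    (by
      intro acc tv htv
      obtain ⟨⟨a, b⟩, ⟨c, d⟩⟩ := acc
      simp only [pvStepA, pvGP, pvHP, pv_lookup tv htv])]
  exact pv_foldl_prod _ _ _ _ _

lemma pvG_char (input_str : String) : ∀ (l : List (String × Int)) (st : Option Int × Int),
    (l.foldl (pvGP input_str) st = st ∨
      ∃ tv ∈ l, 0 ≤ PySem.Str.find input_str tv.1 ∧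
        l.foldl (pvGP input_str) st = (some tv.2, PySem.Str.find input_str tv.1)) ∧
    (l.foldl (pvGP input_str) st).2 ≤ st.2 ∧
    ∀ tv ∈ l, 0 ≤ PySem.Str.find input_str tv.1 →
      (l.foldl (pvGP input_str) st).2 ≤ PySem.Str.find input_str tv.1 := by
  intro l
  induction l with
  | nil => intro st; exact ⟨Or.inl rfl, le_refl _, by simp⟩
  | cons u us ih =>
    intro st
    have hstep : (u :: us).foldl (pvGP input_str) st =
        us.foldl (pvGP input_str) (pvGP input_str st u) := rfl
    obtain ⟨hdisj, hle, hmin⟩ := ih (pvGP input_str st u)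
    by_cases hc : 0 ≤ PySem.Str.find input_str u.1 ∧ PySem.Str.find input_str u.1 < st.2
    · have h1 : pvGP input_str st u = (some u.2, PySem.Str.find input_str u.1) := by
        simp only [pvGP]; rw [if_pos hc]
      refine ⟨?_, ?_, ?_⟩
      · rcases hdisj with heq | ⟨tv, htv, hf, heq⟩
        · exact Or.inr ⟨u, by simp, hc.1, by rw [hstep, heq, h1]⟩
        · exact Or.inr ⟨tv, by simp [htv], hf, by rw [hstep, heq]⟩
      · rw [hstep]
        calc (us.foldl (pvGP input_str) (pvGP input_str st u)).2
            ≤ (pvGP input_str st u).2 := hle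
          _ ≤ st.2 := by rw [h1]; exact le_of_lt hc.2
      · intro tv htv hf
        rcases List.mem_cons.mp htv with heq2 | htv'
        · subst heq2
          rw [hstep]
          calc (us.foldl (pvGP input_str) (pvGP input_str st tv)).2
              ≤ (pvGP input_str st tv).2 := hle
            _ = PySem.Str.find input_str tv.1 := by rw [h1]
        · rw [hstep]; exact hmin tv htv' hf
    · have h1 : pvGP input_str st u = st := by
        simp only [pvGP]; rw [if_neg hc]
      refine ⟨?_, ?_, ?_⟩
      · rcases hdisj with heq | ⟨tv, htv, hf, heq⟩
        · exact Or.inl (by rw [hstep, heq, h1])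
        · exact Or.inr ⟨tv, by simp [htv], hf, by rw [hstep, heq]⟩
      · rw [hstep]; calc (us.foldl (pvGP input_str) (pvGP input_str st u)).2
            ≤ (pvGP input_str st u).2 := hle
          _ = st.2 := by rw [h1]
      · intro tv htv hf
        rcases List.mem_cons.mp htv with heq2 | htv'
        · subst heq2
          have hge : st.2 ≤ PySem.Str.find input_str tv.1 := by
            by_contra hlt
            exact hc ⟨hf, by omega⟩
          rw [hstep]
          calc (us.foldl (pvGP input_str) (pvGP input_str st tv)).2
              ≤ (pvGP input_str st tv).2 := hle
            _ = st.2 := by rw [h1]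
            _ ≤ _ := hge
        · rw [hstep]; exact hmin tv htv' hf

lemma pvH_char (input_str : String) : ∀ (l : List (String × Int)) (st : Option Int × Int),
    (l.foldl (pvHP input_str) st = st ∨
      ∃ tv ∈ l, 0 ≤ PySem.Str.rfind input_str tv.1 ∧
        l.foldl (pvHP input_str) st = (some tv.2, PySem.Str.rfind input_str tv.1)) ∧
    st.2 ≤ (l.foldl (pvHP input_str) st).2 ∧
    ∀ tv ∈ l, 0 ≤ PySem.Str.rfind input_str tv.1 →
      PySem.Str.rfind input_str tv.1 ≤ (l.foldl (pvHP input_str) st).2 := by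
  intro l
  induction l with
  | nil => intro st; exact ⟨Or.inl rfl, le_refl _, by simp⟩
  | cons u us ih =>
    intro st
    have hstep : (u :: us).foldl (pvHP input_str) st =
        us.foldl (pvHP input_str) (pvHP input_str st u) := rfl
    obtain ⟨hdisj, hle, hmax⟩ := ih (pvHP input_str st u)
    by_cases hc : 0 ≤ PySem.Str.rfind input_str u.1 ∧ PySem.Str.rfind input_str u.1 > st.2
    · have h1 : pvHP input_str st u = (some u.2, PySem.Str.rfind input_str u.1) := by
        simp only [pvHP]; rw [if_pos hc]
      refine ⟨?_, ?_, ?_⟩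
      · rcases hdisj with heq | ⟨tv, htv, hf, heq⟩
        · exact Or.inr ⟨u, by simp, hc.1, by rw [hstep, heq, h1]⟩
        · exact Or.inr ⟨tv, by simp [htv], hf, by rw [hstep, heq]⟩
      · rw [hstep]
        calc st.2 ≤ (pvHP input_str st u).2 := by rw [h1]; exact le_of_lt hc.2
          _ ≤ (us.foldl (pvHP input_str) (pvHP input_str st u)).2 := hle
      · intro tv htv hf
        rcases List.mem_cons.mp htv with heq2 | htv'
        · subst heq2
          rw [hstep]
          calc PySem.Str.rfind input_str tv.1 = (pvHP input_str st tv).2 := by rw [h1]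
            _ ≤ _ := hle
        · rw [hstep]; exact hmax tv htv' hf
    · have h1 : pvHP input_str st u = st := by
        simp only [pvHP]; rw [if_neg hc]
      refine ⟨?_, ?_, ?_⟩
      · rcases hdisj with heq | ⟨tv, htv, hf, heq⟩
        · exact Or.inl (by rw [hstep, heq, h1])
        · exact Or.inr ⟨tv, by simp [htv], hf, by rw [hstep, heq]⟩
      · rw [hstep]; calc st.2 = (pvHP input_str st u).2 := by rw [h1]
          _ ≤ _ := hle
      · intro tv htv hf
        rcases List.mem_cons.mp htv with heq2 | htv'
        · subst heq2
          have hge : PySem.Str.rfind input_str tv.1 ≤ st.2 := by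
            by_contra hlt
            exact hc ⟨hf, by omega⟩
          rw [hstep]
          calc PySem.Str.rfind input_str tv.1 ≤ st.2 := hge
            _ = (pvHP input_str st tv).2 := by rw [h1]
            _ ≤ _ := hle
        · rw [hstep]; exact hmax tv htv' hf

-- B's scan: first/last by position
lemma pvB_char (s : List Char) : ∀ n : Nat,
    ((∀ i < n, pvMatchAt s i = none) → (List.range n).foldl (pvStepB s) (none, none) = (none, none)) ∧
    (∀ i₀ < n, ∀ v, pvMatchAt s i₀ = some v → (∀ j < i₀, pvMatchAt s j = none) →
      ((List.range n).foldl (pvStepB s) (none, none)).1 = some v) ∧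
    (∀ i₁ < n, ∀ v, pvMatchAt s i₁ = some v → (∀ j, i₁ < j → j < n → pvMatchAt s j = none) →
      ((List.range n).foldl (pvStepB s) (none, none)).2 = some v) := by
  intro n
  induction n with
  | zero =>
    exact ⟨fun _ => rfl, fun i hi => absurd hi (Nat.not_lt_zero i),
      fun i hi => absurd hi (Nat.not_lt_zero i)⟩
  | succ n ih =>
    obtain ⟨ih1, ih2, ih3⟩ := ih
    have hr : (List.range (n + 1)).foldl (pvStepB s) (none, none) =
        pvStepB s ((List.range n).foldl (pvStepB s) (none, none)) n := by
      rw [List.range_succ, List.foldl_append]; rfl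
    refine ⟨?_, ?_, ?_⟩
    · intro hall
      have h1 : (List.range n).foldl (pvStepB s) (none, none) = (none, none) :=
        ih1 (fun i hi => hall i (by omega))
      rw [hr, h1, pvStepB_matchAt, hall n (by omega)]
    · intro i₀ hi₀ v hv hmin
      rcases Nat.lt_or_ge i₀ n with hlt | hge
      · have hB1 : ((List.range n).foldl (pvStepB s) (none, none)).1 = some v :=
          ih2 i₀ hlt v hv hmin
        rw [hr, pvStepB_matchAt]
        cases hm : pvMatchAt s n with
        | none => simpa using hB1
        | some w => simp [hB1]
      · have he : i₀ = n := by omega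
        subst he
        have h1 : (List.range i₀).foldl (pvStepB s) (none, none) = (none, none) :=
          ih1 (fun j hj => hmin j hj)
        rw [hr, pvStepB_matchAt, hv, h1]
        simp
    · intro i₁ hi₁ v hv hafter
      rcases Nat.lt_or_ge i₁ n with hlt | hge
      · have hm : pvMatchAt s n = none := hafter n (by omega) (by omega)
        rw [hr, pvStepB_matchAt, hm]
        exact ih3 i₁ hlt v hv (fun j h1 h2 => hafter j h1 (by omega))
      · have he : i₁ = n := by omega
        subst he
        rw [hr, pvStepB_matchAt, hv]

lemma pv_occ_find_le {s t : List Char} {j : Nat} (h : t <+: s.drop j) :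
    0 ≤ PySem.Chars.find s t ∧ (PySem.Chars.find s t).toNat ≤ j := by
  have hnn : 0 ≤ PySem.Chars.find s t :=
    (PySem.Chars.find_nonneg_iff s t).mpr (h.isInfix.trans (List.drop_suffix j s).isInfix)
  obtain ⟨hp, hmin⟩ := PySem.Chars.find_spec hnn
  refine ⟨hnn, ?_⟩
  by_contra hlt
  exact hmin j (by omega) h

lemma pv_occ_lt_length {s t : List Char} {j : Nat} (h : t <+: s.drop j) (hne : t ≠ []) :
    j < s.length := by
  by_contra hge
  rw [List.drop_eq_nil_of_le (by omega)] at h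
  exact hne (List.prefix_nil.mp h)

lemma pv_rfind_spec {s t : List Char} {j : Nat} (h : t <+: s.drop j) (hne : t ≠ []) :
    0 ≤ PySem.Chars.rfind s t ∧ j ≤ (PySem.Chars.rfind s t).toNat := by
  have hj : j ≤ s.length := le_of_lt (pv_occ_lt_length h hne)
  have hdef : PySem.Chars.rfind s t = PySem.Chars.rfind.go s t s.length := rfl
  rcases pv_rfind_go_spec s t s.length with ⟨h1, h2⟩ | ⟨k, h1, h2, h3, h4⟩
  · exact absurd h (h2 j hj)
  · rw [hdef, h1]
    refine ⟨Int.natCast_nonneg k, ?_⟩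
    rw [Int.toNat_natCast]
    by_contra hlt
    exact h4 j (by omega) hj h

lemma pv_rfind_occ {s t : List Char} (h : 0 ≤ PySem.Chars.rfind s t) :
    t <+: s.drop (PySem.Chars.rfind s t).toNat ∧
      ∀ i, (PySem.Chars.rfind s t).toNat < i → i ≤ s.length → ¬ t <+: s.drop i := by
  have hdef : PySem.Chars.rfind s t = PySem.Chars.rfind.go s t s.length := rfl
  rcases pv_rfind_go_spec s t s.length with ⟨h1, h2⟩ | ⟨k, h1, h2, h3, h4⟩
  · rw [hdef, h1] at h; omega
  · rw [hdef, h1, Int.toNat_natCast]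
    exact ⟨h3, h4⟩

lemma pvA_eval (input_str : String) :
    parse_first_last_digit input_str =
      (match (pvToks.foldl (pvGP input_str) (none, 100)).1,
             (pvToks.foldl (pvHP input_str) (none, -100)).1 with
       | some a, some b => a * 10 + b
       | _, _ => 0) := by
  simp only [parse_first_last_digit]
  rw [pvA_fold_eq]

-- ===== VERDICT (by name: the statement is the Claim_ definition above) =====
theorem parse_first_last_digit_spec : Claim_equal_parse_first_last_digit := by
  intro inp _ hpre
  unfold Spec_parse_first_last_digit
  obtain ⟨t0s, ht0s, hf0, hf0lt⟩ := hpre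
  have ht0m : t0s ∈ pvToks.map (·.1) := by rw [← pv_check_eq]; exact ht0s
  obtain ⟨t0, ht0, ht0eq⟩ := List.mem_map.mp ht0m
  rw [← ht0eq] at hf0 hf0lt
  have hne0 : t0.1.toList ≠ [] := pv_nonempty t0 ht0
  obtain ⟨gdisj, gle, gmin⟩ := pvG_char inp pvToks (none, 100)
  obtain ⟨hdisj, hle2, hmax⟩ := pvH_char inp pvToks (none, -100)
  simp only [PySem.Str.find_eq, PySem.Str.rfind_eq] at gmin hmax hf0 hf0lt
  have hf0C : 0 ≤ PySem.Chars.find inp.toList t0.1.toList := hf0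
  have hocc0 : t0.1.toList <+: inp.toList.drop (PySem.Chars.find inp.toList t0.1.toList).toNat :=
    (PySem.Chars.find_spec hf0C).1
  have hr0 : 0 ≤ PySem.Chars.rfind inp.toList t0.1.toList := (pv_rfind_spec hocc0 hne0).1
  rcases gdisj with heqG | ⟨ts, hts, hfs, heqG⟩
  · exfalso
    have := gmin t0 ht0 hf0
    rw [heqG] at this
    simp at this
    omega
  rcases hdisj with heqH | ⟨tl, htl, hrl, heqH⟩
  · exfalso
    have := hmax t0 ht0 hr0
    rw [heqH] at this
    simp at this
    omega
  -- first-match position: (find ts).toNat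
  simp only [PySem.Str.find_eq] at hfs heqG
  simp only [PySem.Str.rfind_eq] at hrl heqH
  have hnes : ts.1.toList ≠ [] := pv_nonempty ts hts
  have hfsC : 0 ≤ PySem.Chars.find inp.toList ts.1.toList := hfs
  have hoccs : ts.1.toList <+: inp.toList.drop (PySem.Chars.find inp.toList ts.1.toList).toNat :=
    (PySem.Chars.find_spec hfsC).1
  have hm0 : pvMatchAt inp.toList (PySem.Chars.find inp.toList ts.1.toList).toNat = some ts.2 :=
    pvMatchAt_of_mem hts hoccs
  have hlen0 : (PySem.Chars.find inp.toList ts.1.toList).toNat < inp.toList.length :=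
    pv_occ_lt_length hoccs hnes
  have hmin0 : ∀ j < (PySem.Chars.find inp.toList ts.1.toList).toNat,
      pvMatchAt inp.toList j = none := by
    intro j hj
    by_contra hne
    obtain ⟨v, hv⟩ := Option.ne_none_iff_exists'.mp hne
    obtain ⟨u, hu, hup, _⟩ := pvMatchAt_elim hv
    obtain ⟨hun, hule⟩ := pv_occ_find_le hup
    have hg := gmin u hu hun
    rw [heqG] at hg
    simp at hg
    omega
  have hB1 : ((List.range inp.toList.length).foldl (pvStepB inp.toList) (none, none)).1 = some ts.2 :=
    (pvB_char inp.toList inp.toList.length).2.1 _ hlen0 ts.2 hm0 hmin0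
  -- last-match position: (rfind tl).toNat
  have hnel : tl.1.toList ≠ [] := pv_nonempty tl htl
  have hrlC : 0 ≤ PySem.Chars.rfind inp.toList tl.1.toList := hrl
  obtain ⟨hoccl, hmaxl⟩ := pv_rfind_occ hrlC
  have hlen1 : (PySem.Chars.rfind inp.toList tl.1.toList).toNat < inp.toList.length :=
    pv_occ_lt_length hoccl hnel
  have hm1 : pvMatchAt inp.toList (PySem.Chars.rfind inp.toList tl.1.toList).toNat = some tl.2 :=
    pvMatchAt_of_mem htl hoccl
  have hafter : ∀ j, (PySem.Chars.rfind inp.toList tl.1.toList).toNat < j → j < inp.toList.length →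
      pvMatchAt inp.toList j = none := by
    intro j h1 h2
    by_contra hne
    obtain ⟨v, hv⟩ := Option.ne_none_iff_exists'.mp hne
    obtain ⟨u, hu, hup, _⟩ := pvMatchAt_elim hv
    obtain ⟨hrn, hjle⟩ := pv_rfind_spec hup (pv_nonempty u hu)
    have hg := hmax u hu hrn
    rw [heqH] at hg
    simp at hg
    omega
  have hB2 : ((List.range inp.toList.length).foldl (pvStepB inp.toList) (none, none)).2 = some tl.2 :=
    (pvB_char inp.toList inp.toList.length).2.2 _ hlen1 tl.2 hm1 hafter
  have hBval : parse_first_last_digit_alt inp = ts.2 * 10 + tl.2 := by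
    simp only [parse_first_last_digit_alt]
    rw [hB1, hB2]
  rw [pvA_eval, heqG, heqH, hBval]
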